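-- pv_equiv track=rewrite | github.com/VilardCool/2-sem-Mag | Data Mining/2/fpgrowth.py | build_ordered_itemset
-- ===== SOURCE A (Python) =====
-- def build_ordered_itemset(transactions, frequent_item_sets):
--     keys = list(frequent_item_sets.keys())
--     temp_transactions = []
--     for transaction in transactions:
--         temp_items = []
--         for item in transaction:
--             if item in keys:
--                 temp_items.append(item)
--         temp_transactions.append(temp_items)
--
--     transactions = []
--     for temp_transaction in temp_transactions:
--         new_transaction = []
--         for key in keys:
--             if key in temp_transaction:
--                 new_transaction.append(key)
--         transactions.append(new_transaction)
--
--     return transactions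
-- ===== SOURCE B (Python) =====
-- def build_ordered_itemset(transactions, frequent_item_sets):
--     # single pass: the result row for each transaction is just the frequent keys,
--     # in key order, that occur in the transaction
--     return [[key for key in frequent_item_sets if key in transaction]
--             for transaction in transactions]
-- ===== Notes on version B (the rewrite author's own statement) =====
-- stated objective: simpler
-- what changed: Collapsed A's build-then-reshape two-stage structure (filter each transaction into a temp table, then reorder each temp row by key order) into a single comprehension that directly selects, in key order, the keys present in each transaction, with no intermediate list.
import Mathlib
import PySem

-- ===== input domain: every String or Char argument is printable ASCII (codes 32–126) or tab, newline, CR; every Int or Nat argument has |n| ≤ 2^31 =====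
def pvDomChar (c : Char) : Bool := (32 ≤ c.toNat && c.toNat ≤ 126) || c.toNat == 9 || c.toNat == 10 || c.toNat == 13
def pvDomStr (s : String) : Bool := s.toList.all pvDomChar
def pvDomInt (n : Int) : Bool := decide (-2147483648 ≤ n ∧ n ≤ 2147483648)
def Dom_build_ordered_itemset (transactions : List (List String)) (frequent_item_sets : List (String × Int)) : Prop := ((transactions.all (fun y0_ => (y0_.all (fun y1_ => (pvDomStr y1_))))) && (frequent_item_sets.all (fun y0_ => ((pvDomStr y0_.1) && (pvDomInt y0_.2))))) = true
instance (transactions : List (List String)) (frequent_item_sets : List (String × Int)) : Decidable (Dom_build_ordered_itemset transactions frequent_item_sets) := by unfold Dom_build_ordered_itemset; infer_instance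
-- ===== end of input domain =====

-- B collapses A's two passes (filter each transaction by key membership, then reorder
-- each filtered row by key order) into one direct selection of the keys present in each
-- transaction; objective: simpler.

-- ===== PORT A =====
def build_ordered_itemset (transactions : List (List String)) (frequent_item_sets : List (String × Int)) : List (List String) :=
  let keys := (PySem.Dict.ofList frequent_item_sets).keys
  let temp_transactions :=
    transactions.foldl (fun acc transaction =>
      acc ++ [transaction.foldl (fun tacc item =>
        if keys.contains item then tacc ++ [item] else tacc) []]) []
  temp_transactions.foldl (fun acc temp_transaction =>
    acc ++ [keys.foldl (fun nacc key =>
      if temp_transaction.contains key then nacc ++ [key] else nacc) []]) []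

-- ===== PORT B =====
def build_ordered_itemset_alt (transactions : List (List String)) (frequent_item_sets : List (String × Int)) : List (List String) :=
  transactions.map (fun transaction =>
    ((PySem.Dict.ofList frequent_item_sets).keys).filter (fun key => transaction.contains key))

-- ===== PRECONDITION & SPEC =====
def Spec_build_ordered_itemset (transactions : List (List String)) (frequent_item_sets : List (String × Int)) (out : List (List String)) : Prop := out = build_ordered_itemset_alt transactions frequent_item_sets
instance (transactions : List (List String)) (frequent_item_sets : List (String × Int)) (out : List (List String)) : Decidable (Spec_build_ordered_itemset transactions frequent_item_sets out) := by unfold Spec_build_ordered_itemset; infer_instance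

-- ===== CLAIM (what is proved, stated in full; the proofs are below) =====
def Claim_equal_build_ordered_itemset : Prop := ∀ (transactions : List (List String)) (frequent_item_sets : List (String × Int)), Dom_build_ordered_itemset transactions frequent_item_sets → Spec_build_ordered_itemset transactions frequent_item_sets (build_ordered_itemset transactions frequent_item_sets)

-- ===== LEMMAS AND PROOFS =====

-- ===== VERDICT (by name: the statement is the Claim_ definition above) =====
theorem filter_contains_filter (keys t : List String) :
    keys.filter (fun k => (t.filter (fun i => keys.contains i)).contains k)
      = keys.filter (fun k => t.contains k) := by
  apply List.filter_congr
  intro k hk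
  simp [List.mem_filter, hk]

theorem build_ordered_itemset_spec : Claim_equal_build_ordered_itemset := by
  intro transactions fis _
  unfold Spec_build_ordered_itemset build_ordered_itemset build_ordered_itemset_alt
  simp only [PySem.List.foldl_append_if_eq_filter, PySem.List.foldl_append_singleton_eq_map,
    List.nil_append, List.map_map]
  exact List.map_congr_left (fun t _ => filter_contains_filter _ t)
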